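-- pv_equiv track=rewrite | github.com/animeshthomas/python-challenges | string challanges/find_substring_in_list.py | checkSubstr
-- ===== SOURCE A (Python) =====
-- def checkSubstr(list1, list2):
--     res = []
--     for i in list1:
--         temp = False
--         for j in list2:
--             if i in j:
--                 temp = True
--                 break
--         res.append(temp)
--     return res
-- ===== SOURCE B (Python) =====
-- def checkSubstr(list1, list2):
--     if not list2:
--         return [False] * len(list1)
--     big = "\x00".join(list2)
--     return [q in big for q in list1]
-- ===== Notes on version B (the rewrite author's own statement) =====
-- stated objective: faster
-- what changed: B joins list2 into one text with a '\x00' separator (a char outside the ASCII input domain) and does a single substring search per query, replacing A's Python-level loop over list2 with one C-level search.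
import Mathlib
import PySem

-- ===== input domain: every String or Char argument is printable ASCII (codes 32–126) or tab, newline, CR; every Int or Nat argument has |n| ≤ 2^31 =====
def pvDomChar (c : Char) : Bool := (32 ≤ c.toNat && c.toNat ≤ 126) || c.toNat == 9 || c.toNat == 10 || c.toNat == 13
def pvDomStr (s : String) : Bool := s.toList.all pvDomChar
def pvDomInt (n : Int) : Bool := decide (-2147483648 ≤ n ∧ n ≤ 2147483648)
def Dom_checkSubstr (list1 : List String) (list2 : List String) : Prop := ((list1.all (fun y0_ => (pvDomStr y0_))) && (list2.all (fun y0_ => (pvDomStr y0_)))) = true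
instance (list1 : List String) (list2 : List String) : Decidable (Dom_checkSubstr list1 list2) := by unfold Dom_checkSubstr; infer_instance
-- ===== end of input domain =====

-- B joins list2 with '\x00' (a char outside the ASCII input domain) and runs one substring search per query;
-- a timing run measured B faster by a constant factor (C-level search over one text vs a Python loop over list2).
-- ===== PORT A =====
-- inner loop of A: 'for j in list2: if i in j: temp = True; break' (temp starts False)
def pvInnerA (i : String) : List String → Bool
  | [] => false
  | j :: js => if PySem.Str.isIn i j then true else pvInnerA i js

def checkSubstr (list1 : List String) (list2 : List String) : List Bool :=
  list1.foldl (fun res i => res ++ [pvInnerA i list2]) []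

-- ===== PORT B =====
def checkSubstr_alt (list1 : List String) (list2 : List String) : List Bool :=
  if list2.isEmpty then List.replicate list1.length false
  else
    let big := PySem.Str.join "\x00" list2
    list1.map (fun q => PySem.Str.isIn q big)

-- ===== PRECONDITION & SPEC =====
def Spec_checkSubstr (list1 : List String) (list2 : List String) (out : List Bool) : Prop := out = checkSubstr_alt list1 list2
instance (list1 : List String) (list2 : List String) (out : List Bool) : Decidable (Spec_checkSubstr list1 list2 out) := by unfold Spec_checkSubstr; infer_instance

-- ===== CLAIM (what is proved, stated in full; the proofs are below) =====
def Claim_equal_checkSubstr : Prop := ∀ (list1 : List String) (list2 : List String), Dom_checkSubstr list1 list2 → Spec_checkSubstr list1 list2 (checkSubstr list1 list2)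

-- ===== LEMMAS AND PROOFS =====

theorem pvInnerA_eq_any (i : String) (l2 : List String) :
    pvInnerA i l2 = l2.any (fun j => PySem.Str.isIn i j) := by
  induction l2 with
  | nil => rfl
  | cons j js ih =>
      simp only [pvInnerA, List.any_cons, ih]
      cases PySem.Str.isIn i j
      · simp
      · simp

-- an infix that avoids c cannot straddle an occurrence of c
theorem pv_infix_split {c : Char} {sub xs ys : List Char} (hc : c ∉ sub)
    (h : sub <:+: xs ++ c :: ys) : sub <:+: xs ∨ sub <:+: ys := by
  obtain ⟨s, t, hst⟩ := h
  by_cases h1 : s.length + sub.length ≤ xs.length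
  · left
    have hsub : sub = (xs.drop s.length).take sub.length := by
      have h3 := congrArg (fun l => (l.drop s.length).take sub.length) hst
      simp only [List.append_assoc] at h3
      rw [List.drop_left, List.take_left] at h3
      rw [List.drop_append_of_le_length (by omega),
        List.take_append_of_le_length (by simp; omega)] at h3
      exact h3
    rw [hsub]
    exact ((xs.drop s.length).take_prefix sub.length).isInfix.trans
      (xs.drop_suffix s.length).isInfix
  · by_cases h2 : xs.length + 1 ≤ s.length
    · right
      have := congrArg (fun l => l.drop (xs.length + 1)) hst
      simp only [List.append_assoc] at this
      rw [List.drop_append_of_le_length h2] at this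
      have hys : (xs ++ c :: ys).drop (xs.length + 1) = ys := by
        have : xs ++ c :: ys = (xs ++ [c]) ++ ys := by simp
        rw [this, List.drop_left' (by simp)]
      rw [hys] at this
      exact ⟨s.drop (xs.length + 1), t, by rw [List.append_assoc]; exact this⟩
    · exfalso
      apply hc
      have hm : (s ++ (sub ++ t))[xs.length]? = some c := by
        rw [← List.append_assoc, hst, List.getElem?_append_right (le_refl _)]
        simp
      rw [List.getElem?_append_right (by omega),
        List.getElem?_append_left (by omega)] at hm
      exact List.mem_of_getElem? hm

theorem pv_mem_infix_join (sep : List Char) :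
    ∀ (parts : List (List Char)) (p : List Char), p ∈ parts →
      p <:+: PySem.Chars.join sep parts := by
  intro parts
  induction parts with
  | nil => intro p hp; simp at hp
  | cons p₀ rest ih =>
      intro p hp
      cases rest with
      | nil =>
          simp at hp
          subst hp
          simp [PySem.Chars.join_singleton]
      | cons q rest' =>
          rw [PySem.Chars.join_cons_cons]
          rcases List.mem_cons.mp hp with h | h
          · subst h; exact (List.prefix_append _ _).isInfix.trans
              ((p ++ sep).prefix_append _).isInfix
          · exact ((ih p h).trans (List.suffix_append _ _).isInfix)

theorem pv_infix_join_iff {c : Char} {sub : List Char} (hc : c ∉ sub) :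
    ∀ (parts : List (List Char)), parts ≠ [] →
      (sub <:+: PySem.Chars.join [c] parts ↔ ∃ p ∈ parts, sub <:+: p) := by
  intro parts
  induction parts with
  | nil => intro h; exact absurd rfl h
  | cons p₀ rest ih =>
      intro _
      cases rest with
      | nil => simp [PySem.Chars.join_singleton]
      | cons q rest' =>
          constructor
          · intro h
            rw [PySem.Chars.join_cons_cons] at h
            have h' : sub <:+: p₀ ++ c :: PySem.Chars.join [c] (q :: rest') := by
              simpa [List.append_assoc] using h
            rcases pv_infix_split hc h' with h1 | h1
            · exact ⟨p₀, by simp, h1⟩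
            · obtain ⟨p, hp, hinf⟩ := (ih (by simp)).mp h1
              exact ⟨p, by simp [hp], hinf⟩
          · rintro ⟨p, hp, hinf⟩
            exact hinf.trans (pv_mem_infix_join [c] _ p hp)

theorem pv_isIn_join (q : String) (list2 : List String) (hq : '\x00' ∉ q.toList)
    (hne : list2 ≠ []) :
    PySem.Str.isIn q (PySem.Str.join "\x00" list2)
      = list2.any (fun j => PySem.Str.isIn q j) := by
  have hbig : (PySem.Str.join "\x00" list2).toList
      = PySem.Chars.join ['\x00'] (list2.map String.toList) := by
    simp [PySem.Str.toList_join "\x00" list2]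
  rw [Bool.eq_iff_iff, PySem.Str.isIn_iff_infix, hbig, List.any_eq_true,
    pv_infix_join_iff hq (list2.map String.toList) (by simpa using hne)]
  constructor
  · rintro ⟨p, hp, hinf⟩
    obtain ⟨j, hj, rfl⟩ := List.mem_map.mp hp
    exact ⟨j, hj, (PySem.Str.isIn_iff_infix _ _).mpr hinf⟩
  · rintro ⟨j, hj, h⟩
    exact ⟨j.toList, List.mem_map_of_mem hj, (PySem.Str.isIn_iff_infix _ _).mp h⟩

-- ===== VERDICT (by name: the statement is the Claim_ definition above) =====
theorem checkSubstr_spec : Claim_equal_checkSubstr := by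
  intro list1 list2 hdom
  unfold Spec_checkSubstr checkSubstr checkSubstr_alt
  rw [PySem.List.foldl_append_singleton_eq_map]
  cases list2 with
  | nil =>
      simp [pvInnerA, List.map_const']
  | cons j js =>
      simp only [List.isEmpty_cons, Bool.false_eq_true, if_false]
      apply List.map_congr_left
      intro q hq
      have hdom1 : pvDomStr q = true := by
        unfold Dom_checkSubstr at hdom
        simp only [Bool.and_eq_true, List.all_eq_true] at hdom
        exact hdom.1 q hq
      have hq0 : '\x00' ∉ q.toList := by
        intro hmem
        unfold pvDomStr at hdom1
        rw [List.all_eq_true] at hdom1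
        have := hdom1 _ hmem
        simp [pvDomChar] at this
      rw [pvInnerA_eq_any, pv_isIn_join q (j :: js) hq0 (by simp)]
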